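-- pv_equiv track=rewrite | github.com/curly60e/pytoken | Pytoken_blockchain.py | convert_bits
-- ===== SOURCE A (Python) =====
-- def convert_bits(data, from_bits, to_bits, pad=True):
--     acc = 0
--     bits = 0
--     ret = []
--     maxv = (1 << to_bits) - 1
--     max_acc = (1 << (from_bits + to_bits - 1)) - 1
--     for value in data:
--         if value < 0 or (value >> from_bits):
--             return None
--         acc = ((acc << from_bits) | value) & max_acc
--         bits += from_bits
--         while bits >= to_bits:
--             bits -= to_bits
--             ret.append((acc >> bits) & maxv)
--
--     if pad:
--         if bits:
--             ret.append((acc << (to_bits - bits)) & maxv)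
--     elif bits >= from_bits or ((acc << (to_bits - bits)) & maxv):
--         return None
--
--     return ret
-- ===== SOURCE B (Python) =====
-- def _group_value(bits):
--     group = 0
--     for b in bits:
--         group = (group << 1) | b
--     return group
--
--
-- def convert_bits(data, from_bits, to_bits, pad=True):
--     # Flatten the input into one bit list (MSB first per value), then regroup.
--     bit_list = []
--     for value in data:
--         if value < 0 or (value >> from_bits):
--             return None
--         for i in range(from_bits - 1, -1, -1):
--             bit_list.append((value >> i) & 1)
--     ret = []
--     pos = 0
--     while len(bit_list) - pos >= to_bits:
--         ret.append(_group_value(bit_list[pos:pos + to_bits]))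
--         pos += to_bits
--     rem = len(bit_list) - pos
--     if pad:
--         if rem:
--             ret.append(_group_value(bit_list[pos:]) << (to_bits - rem))
--     elif rem >= from_bits or any(bit_list[pos:]):
--         return None
--     return ret
-- ===== Notes on version B (the rewrite author's own statement) =====
-- stated objective: alternative
-- what changed: Replaces the rolling masked accumulator with its interleaved carry-counting inner while loop by a two-phase pipeline: flatten all values into one explicit bit list (MSB first), then regroup that list into to_bits-sized chunks with a position pointer, handling padding/rejection directly on the leftover bits.
-- outside the precondition, e.g. on convert_bits([], 8, 0, True): A returns [], B does not finish within the time limit; on convert_bits([-1], 8, 0, True): A returns None, B returns None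
import Mathlib
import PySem

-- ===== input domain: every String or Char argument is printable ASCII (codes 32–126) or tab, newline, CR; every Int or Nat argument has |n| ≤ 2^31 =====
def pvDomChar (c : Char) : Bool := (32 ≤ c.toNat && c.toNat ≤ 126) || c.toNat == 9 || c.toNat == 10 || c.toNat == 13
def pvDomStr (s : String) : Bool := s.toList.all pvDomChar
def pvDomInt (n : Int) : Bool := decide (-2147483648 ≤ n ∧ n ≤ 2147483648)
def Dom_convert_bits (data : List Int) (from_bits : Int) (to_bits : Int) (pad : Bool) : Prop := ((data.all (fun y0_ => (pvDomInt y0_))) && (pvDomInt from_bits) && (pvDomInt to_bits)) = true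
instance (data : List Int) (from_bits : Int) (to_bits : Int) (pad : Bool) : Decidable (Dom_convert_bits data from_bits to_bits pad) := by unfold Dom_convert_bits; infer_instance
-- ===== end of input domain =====

-- convert_bits (bech32 regrouping): B flattens the values into one explicit bit list and regroups it,
-- instead of A's rolling masked accumulator with an interleaved inner while loop; proved equal on Pre_.


-- ===== PORT A =====
-- inner 'while bits >= to_bits' loop; fuel = bits.toNat suffices whenever to_bits ≥ 1
def pvA_while (to_bits maxv : Int) : Nat → Int → Int → List Int → Int × List Int
  | 0, _, bits, ret => (bits, ret)
  | fuel + 1, acc, bits, ret =>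
    if to_bits ≤ bits then
      pvA_while to_bits maxv fuel acc (bits - to_bits)
        (ret ++ [PySem.Int.band (acc >>> (bits - to_bits).toNat) maxv])
    else (bits, ret)

-- the 'for value in data' loop; carries (acc, bits, ret)
def pvA_loop (from_bits to_bits maxv max_acc : Int) :
    List Int → Int → Int → List Int → Option (Int × Int × List Int)
  | [], acc, bits, ret => some (acc, bits, ret)
  | v :: rest, acc, bits, ret =>
    if v < 0 ∨ v >>> from_bits.toNat ≠ 0 then none
    else
      let acc1 := PySem.Int.band (PySem.Int.bor (acc <<< from_bits.toNat) v) max_acc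
      let bits1 := bits + from_bits
      let s := pvA_while to_bits maxv bits1.toNat acc1 bits1 ret
      pvA_loop from_bits to_bits maxv max_acc rest acc1 s.1 s.2

def convert_bits (data : List Int) (from_bits : Int) (to_bits : Int) (pad : Bool) : Option (List Int) :=
  let maxv : Int := (1 <<< to_bits.toNat) - 1
  let max_acc : Int := (1 <<< (from_bits + to_bits - 1).toNat) - 1
  match pvA_loop from_bits to_bits maxv max_acc data 0 0 [] with
  | none => none
  | some (acc, bits, ret) =>
    if pad then
      if bits ≠ 0 then some (ret ++ [PySem.Int.band (acc <<< (to_bits - bits).toNat) maxv])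
      else some ret
    else if from_bits ≤ bits ∨ PySem.Int.band (acc <<< (to_bits - bits).toNat) maxv ≠ 0 then none
    else some ret

-- ===== PORT B =====
-- helper _group_value: fold the bits of a chunk into one integer
def pvB_group (bits : List Int) : Int :=
  bits.foldl (fun group b => PySem.Int.bor (group <<< (1:Nat)) b) 0

-- 'for i in range(from_bits - 1, -1, -1): bit_list.append((value >> i) & 1)'
def pvB_bits (from_bits v : Int) (bl : List Int) : List Int :=
  (PySem.List.pyRange (from_bits - 1) (-1) (-1)).foldl
    (fun bl i => bl ++ [PySem.Int.band (v >>> i.toNat) 1]) bl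

-- first phase: validate values and collect the flat bit list
def pvB_collect (from_bits : Int) : List Int → List Int → Option (List Int)
  | [], bl => some bl
  | v :: rest, bl =>
    if v < 0 ∨ v >>> from_bits.toNat ≠ 0 then none
    else pvB_collect from_bits rest (pvB_bits from_bits v bl)

-- second phase: 'while len(bit_list) - pos >= to_bits'; fuel = bit_list.length suffices whenever
-- to_bits ≥ 1; carries the read position pos and returns (final pos, ret)
def pvB_chunk (to_bits : Int) : Nat → Int → List Int → List Int → Int × List Int
  | 0, pos, _, ret => (pos, ret)
  | fuel + 1, pos, bl, ret =>
    if to_bits ≤ (bl.length : Int) - pos then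
      pvB_chunk to_bits fuel (pos + to_bits) bl
        (ret ++ [pvB_group (PySem.List.slice bl (some pos) (some (pos + to_bits)))])
    else (pos, ret)

def convert_bits_alt (data : List Int) (from_bits : Int) (to_bits : Int) (pad : Bool) : Option (List Int) :=
  match pvB_collect from_bits data [] with
  | none => none
  | some bl =>
    let s := pvB_chunk to_bits bl.length 0 bl []
    let rem : Int := (bl.length : Int) - s.1
    if pad then
      if rem ≠ 0 then
        some (s.2 ++ [pvB_group (PySem.List.slice bl (some s.1) none) <<< (to_bits - rem).toNat])
      else some s.2
    else if from_bits ≤ rem ∨ (PySem.List.slice bl (some s.1) none).any (fun b => b ≠ 0) then none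
    else some s.2

-- ===== PRECONDITION & SPEC =====
-- Pre_ excludes inputs where A raises ValueError on a negative shift amount or loops forever when
-- to_bits = 0; the only excluded inputs on which A still returns are to_bits = 0 calls that never
-- enter the inner loop (empty data, where B loops forever, or an invalid first value, where both
-- return None before looping).
def Pre_convert_bits (data : List Int) (from_bits : Int) (to_bits : Int) (pad : Bool) : Prop :=
  1 ≤ to_bits ∧ (0 ≤ from_bits ∨ (data = [] ∧ 0 ≤ from_bits + to_bits - 1))
instance (data : List Int) (from_bits : Int) (to_bits : Int) (pad : Bool) : Decidable (Pre_convert_bits data from_bits to_bits pad) := by unfold Pre_convert_bits; infer_instance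

def pvWitness_convert_bits : List Int × Int × Int × Bool := ([5, 20, 31], 5, 8, true)

def Spec_convert_bits (data : List Int) (from_bits : Int) (to_bits : Int) (pad : Bool) (out : Option (List Int)) : Prop := out = convert_bits_alt data from_bits to_bits pad
instance (data : List Int) (from_bits : Int) (to_bits : Int) (pad : Bool) (out : Option (List Int)) : Decidable (Spec_convert_bits data from_bits to_bits pad out) := by unfold Spec_convert_bits; infer_instance

-- ===== CLAIM (what is proved, stated in full; the proofs are below) =====
def Claim_equal_convert_bits : Prop := ∀ (data : List Int) (from_bits : Int) (to_bits : Int) (pad : Bool), Dom_convert_bits data from_bits to_bits pad → Pre_convert_bits data from_bits to_bits pad → Spec_convert_bits data from_bits to_bits pad (convert_bits data from_bits to_bits pad)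

-- ===== LEMMAS AND PROOFS =====

-- value of a bit list, MSB first
def bitval (bl : List Int) : Int := bl.foldl (fun a b => 2 * a + b) 0

-- every entry is a bit
def GoodL (bl : List Int) : Prop := ∀ b ∈ bl, b = 0 ∨ b = 1

-- reference chunking: split L into tn-bit groups from the front, return (pending remainder, groups)
def chunkSpec (tn : Nat) (L : List Int) : List Int × List Int :=
  if h : tn = 0 ∨ L.length < tn then (L, [])
  else
    let p := chunkSpec tn (L.drop tn)
    (p.1, bitval (L.take tn) :: p.2)
  termination_by L.length
  decreasing_by simp only [List.length_drop]; omega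

-- MSB-first bits of v (low fn of them)
def bitsOf (fn : Nat) (v : Int) : List Int :=
  (List.range fn).reverse.map (fun i => v / 2 ^ i % 2)

-- ---- integer/bit toolkit ----

lemma two_pow_cast (n : Nat) : ((2:Int) ^ n) = ((2 ^ n : Nat) : Int) := by push_cast; rfl

lemma mask_eq (n : Nat) : ((1:Int) <<< n) - 1 = 2 ^ n - 1 := by rw [Int.shiftLeft_eq]; ring

lemma shl_eq (a : Int) (n : Nat) : a <<< n = a * 2 ^ n := Int.shiftLeft_eq a n

lemma shr_nonneg (a : Int) (n : Nat) (h : 0 ≤ a) : a >>> n = a / 2 ^ n := by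
  obtain ⟨m, rfl⟩ := Int.eq_ofNat_of_zero_le h
  rw [Int.shiftRight_eq, show ((m:Int)).shiftRight n = ((m >>> n : Nat) : Int) from rfl,
    Nat.shiftRight_eq_div_pow, two_pow_cast]
  exact (Int.ofNat_ediv_ofNat).symm

lemma band_mod (a : Int) (n : Nat) (h : 0 ≤ a) : PySem.Int.band a (2 ^ n - 1) = a % 2 ^ n := by
  have h2 : (1:Nat) ≤ 2 ^ n := Nat.one_le_two_pow
  rw [PySem.Int.band_of_nonneg h (by rw [two_pow_cast]; omega)]
  obtain ⟨m, rfl⟩ := Int.eq_ofNat_of_zero_le h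
  rw [show ((2:Int) ^ n - 1).toNat = 2 ^ n - 1 by rw [two_pow_cast]; omega]
  simp only [Int.toNat_natCast, Nat.and_two_pow_sub_one_eq_mod, two_pow_cast]
  exact Int.ofNat_mod_ofNat m (2 ^ n)

lemma bor_shift (a v : Int) (n : Nat) (ha : 0 ≤ a) (hv : 0 ≤ v) (hlt : v < 2 ^ n) :
    PySem.Int.bor (a <<< n) v = a * 2 ^ n + v := by
  rw [shl_eq, PySem.Int.bor_of_nonneg (by positivity) hv]
  obtain ⟨m, rfl⟩ := Int.eq_ofNat_of_zero_le ha
  obtain ⟨w, rfl⟩ := Int.eq_ofNat_of_zero_le hv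
  rw [two_pow_cast, ← Nat.cast_mul, Int.toNat_natCast, Int.toNat_natCast,
    ← Nat.shiftLeft_eq_mul_pow, ← Nat.shiftLeft_add_eq_or_of_lt (by exact_mod_cast hlt)]
  push_cast [Nat.shiftLeft_eq]; ring

-- v % 2^(n+1) split into top bit and rest
lemma emod_pow_succ (v : Int) (n : Nat) :
    v % 2 ^ (n + 1) = v / 2 ^ n % 2 * 2 ^ n + v % 2 ^ n := by
  have hp : (0:Int) < 2 ^ n := by positivity
  have h1 := Int.ediv_add_emod v (2 ^ n)
  have h2 := Int.ediv_add_emod (v / 2 ^ n) 2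
  have h3 := Int.emod_nonneg v (by positivity : (2:Int)^n ≠ 0)
  have h4 := Int.emod_lt_of_pos v hp
  have h5 := Int.emod_nonneg (v / 2 ^ n) (by norm_num : (2:Int) ≠ 0)
  have h6 := Int.emod_lt_of_pos (v / 2 ^ n) (by norm_num : (0:Int) < 2)
  have hv : v = (v / 2 ^ n % 2 * 2 ^ n + v % 2 ^ n) + 2 ^ (n + 1) * (v / 2 ^ n / 2) := by
    rw [pow_succ]; nlinarith [h1, h2]
  have hb1 : 0 ≤ v / 2 ^ n % 2 * 2 ^ n + v % 2 ^ n := by nlinarith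
  have hb2 : v / 2 ^ n % 2 * 2 ^ n + v % 2 ^ n < 2 ^ (n + 1) := by
    have : v / 2 ^ n % 2 = 0 ∨ v / 2 ^ n % 2 = 1 := by omega
    rcases this with h | h <;> rw [h] <;> rw [pow_succ] <;> nlinarith
  conv_lhs => rw [hv]
  rw [Int.add_mul_emod_self_left, Int.emod_eq_of_lt hb1 hb2]

-- (a*2^f + v) % 2^(p+f) = (a % 2^p)*2^f + v for 0 ≤ v < 2^f
lemma emod_pow_add_split (a v : Int) (p f : Nat) (hv : 0 ≤ v) (hlt : v < 2 ^ f) :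
    (a * 2 ^ f + v) % 2 ^ (p + f) = a % 2 ^ p * 2 ^ f + v := by
  have hp : (0:Int) < 2 ^ p := by positivity
  have hf : (0:Int) < 2 ^ f := by positivity
  have h1 := Int.ediv_add_emod a (2 ^ p)
  have h3 := Int.emod_nonneg a (by positivity : (2:Int)^p ≠ 0)
  have h4 := Int.emod_lt_of_pos a hp
  have hv2 : a * 2 ^ f + v = (a % 2 ^ p * 2 ^ f + v) + 2 ^ (p + f) * (a / 2 ^ p) := by
    rw [pow_add]; nlinarith
  have hb1 : 0 ≤ a % 2 ^ p * 2 ^ f + v := by nlinarith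
  have hb2 : a % 2 ^ p * 2 ^ f + v < 2 ^ (p + f) := by rw [pow_add]; nlinarith
  conv_lhs => rw [hv2]
  rw [Int.add_mul_emod_self_left, Int.emod_eq_of_lt hb1 hb2]

-- (a*2^s) % 2^(p+s) = (a % 2^p)*2^s
lemma emod_pow_mul (a : Int) (p s : Nat) :
    a * 2 ^ s % 2 ^ (p + s) = a % 2 ^ p * 2 ^ s := by
  have := emod_pow_add_split a 0 p s le_rfl (by positivity)
  simpa using this

-- (a / 2^k) % 2^t = (a % 2^(k+t)) / 2^k for 0 ≤ a
lemma ediv_emod_pow (a : Int) (k t : Nat) (h : 0 ≤ a) :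
    a / 2 ^ k % 2 ^ t = a % 2 ^ (k + t) / 2 ^ k := by
  obtain ⟨m, rfl⟩ := Int.eq_ofNat_of_zero_le h
  have hN : m / 2 ^ k % 2 ^ t = m % 2 ^ (k + t) / 2 ^ k := by
    rw [pow_add]
    exact (Nat.mod_mul_right_div_self m (2 ^ k) (2 ^ t)).symm
  exact_mod_cast hN

-- ---- bitval ----

lemma bitval_foldl_init (L : List Int) (a : Int) :
    L.foldl (fun x b => 2 * x + b) a = a * 2 ^ L.length + bitval L := by
  induction L generalizing a with
  | nil => simp [bitval]
  | cons b L ih =>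
    have hb : bitval (b :: L) = b * 2 ^ L.length + bitval L := by
      show List.foldl (fun x b => 2 * x + b) (2 * 0 + b) L = b * 2 ^ L.length + bitval L
      rw [ih (2 * 0 + b)]
      ring
    rw [List.foldl_cons, ih (2 * a + b), hb, List.length_cons]
    ring

lemma bitval_cons (b : Int) (L : List Int) :
    bitval (b :: L) = b * 2 ^ L.length + bitval L := by
  show List.foldl (fun x b => 2 * x + b) (2 * 0 + b) L = b * 2 ^ L.length + bitval L
  rw [bitval_foldl_init L (2 * 0 + b)]
  ring

lemma bitval_append (X Y : List Int) :
    bitval (X ++ Y) = bitval X * 2 ^ Y.length + bitval Y := by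
  simp only [bitval, List.foldl_append]
  exact bitval_foldl_init Y _

lemma bitval_bounds {L : List Int} (h : GoodL L) : 0 ≤ bitval L ∧ bitval L < 2 ^ L.length := by
  induction L with
  | nil => simp [bitval]
  | cons b L ih =>
    have hb := h b (by simp)
    have ihL := ih (fun x hx => h x (by simp [hx]))
    rw [bitval_cons]
    have hp : (0:Int) < 2 ^ L.length := by positivity
    rcases hb with rfl | rfl <;> simp only [List.length_cons, pow_succ] <;>
      constructor <;> nlinarith [ihL.1, ihL.2]

lemma bitval_eq_zero_iff {L : List Int} (h : GoodL L) :
    (bitval L = 0 ↔ ∀ b ∈ L, b = 0) := by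
  induction L with
  | nil => simp [bitval]
  | cons b L ih =>
    have hb := h b (by simp)
    have hL : GoodL L := fun x hx => h x (by simp [hx])
    have ihL := ih hL
    have hbd := bitval_bounds hL
    rw [bitval_cons]
    have hp : (0:Int) < 2 ^ L.length := by positivity
    simp only [List.mem_cons, forall_eq_or_imp]
    constructor
    · intro he
      rcases hb with rfl | rfl
      · exact ⟨rfl, ihL.mp (by linarith)⟩
      · nlinarith [hbd.1]
    · rintro ⟨rfl, hall⟩
      rw [ihL.mpr hall]; ring

lemma group_eq_bitval {L : List Int} (h : GoodL L) : pvB_group L = bitval L := by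
  have aux : ∀ (M : List Int), GoodL M → ∀ a : Int, 0 ≤ a →
      M.foldl (fun g b => PySem.Int.bor (g <<< (1:Nat)) b) a = M.foldl (fun x b => 2 * x + b) a := by
    intro M hM
    induction M with
    | nil => intro a _; rfl
    | cons b M ih =>
      intro a ha
      have hb := hM b (by simp)
      have hM' : GoodL M := fun x hx => hM x (by simp [hx])
      simp only [List.foldl_cons]
      rw [show PySem.Int.bor (a <<< (1:Nat)) b = 2 * a + b by
            rw [bor_shift a b 1 ha (by rcases hb with rfl | rfl <;> norm_num)
              (by rcases hb with rfl | rfl <;> norm_num)]; ring]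
      exact ih hM' (2 * a + b) (by rcases hb with rfl | rfl <;> [skip; skip] <;> nlinarith)
  unfold pvB_group bitval
  exact aux L h 0 le_rfl

-- ---- chunkSpec ----

lemma chunkSpec_small {tn : Nat} {L : List Int} (h : L.length < tn) :
    chunkSpec tn L = (L, []) := by
  rw [chunkSpec]; simp [h]

lemma chunkSpec_step {tn : Nat} {L : List Int} (h1 : 1 ≤ tn) (h2 : tn ≤ L.length) :
    chunkSpec tn L = ((chunkSpec tn (L.drop tn)).1, bitval (L.take tn) :: (chunkSpec tn (L.drop tn)).2) := by
  rw [chunkSpec]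
  have : ¬ (tn = 0 ∨ L.length < tn) := by omega
  simp [this]

lemma chunkSpec_pending_len {tn : Nat} (h1 : 1 ≤ tn) (L : List Int) :
    (chunkSpec tn L).1.length = L.length % tn := by
  have : ∀ N (L : List Int), L.length ≤ N → (chunkSpec tn L).1.length = L.length % tn := by
    intro N
    induction N with
    | zero =>
      intro L hL
      rw [chunkSpec_small (by omega)]
      simp [show L.length = 0 from by omega]
    | succ N ih =>
      intro L hL
      by_cases hlen : L.length < tn
      · rw [chunkSpec_small hlen]; exact (Nat.mod_eq_of_lt hlen).symm
      · rw [chunkSpec_step h1 (by omega)]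
        have := ih (L.drop tn) (by simp; omega)
        simp only [List.length_drop] at this
        rw [this, ← Nat.mod_eq_sub_mod (by omega)]
  exact this L.length L le_rfl

lemma chunkSpec_pending_good {tn : Nat} (h1 : 1 ≤ tn) {L : List Int} (h : GoodL L) :
    GoodL (chunkSpec tn L).1 := by
  have main : ∀ N (L : List Int), L.length ≤ N → GoodL L → GoodL (chunkSpec tn L).1 := by
    intro N
    induction N with
    | zero => intro L hL hG; rw [chunkSpec_small (by omega)]; exact hG
    | succ N ih =>
      intro L hL hG
      by_cases hlen : L.length < tn
      · rw [chunkSpec_small hlen]; exact hG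
      · rw [chunkSpec_step h1 (by omega)]
        exact ih (L.drop tn) (by simp; omega)
          (fun x hx => hG x (List.mem_of_mem_drop hx))
  exact main L.length L le_rfl h

lemma chunkSpec_pending_mod {tn : Nat} (h1 : 1 ≤ tn) {L : List Int} (h : GoodL L) :
    bitval (chunkSpec tn L).1 = bitval L % 2 ^ (chunkSpec tn L).1.length := by
  have main : ∀ N (L : List Int), L.length ≤ N → GoodL L →
      bitval (chunkSpec tn L).1 = bitval L % 2 ^ (chunkSpec tn L).1.length := by
    intro N
    induction N with
    | zero =>
      intro L hL hG
      rw [chunkSpec_small (by omega)]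
      have : L.length = 0 := by omega
      rw [List.eq_nil_of_length_eq_zero this]
      simp [bitval]
    | succ N ih
    =>
      intro L hL hG
      by_cases hlen : L.length < tn
      · rw [chunkSpec_small hlen]
        exact (Int.emod_eq_of_lt (bitval_bounds hG).1 (bitval_bounds hG).2).symm
      · have hG' : GoodL (L.drop tn) := fun x hx => hG x (List.mem_of_mem_drop hx)
        rw [chunkSpec_step h1 (by omega)]
        have ihd := ih (L.drop tn) (by simp; omega) hG'
        simp only
        rw [ihd]
        have hsplit : bitval L = bitval (L.take tn) * 2 ^ (L.drop tn).length + bitval (L.drop tn) := by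
          conv_lhs => rw [← List.take_append_drop tn L]
          rw [bitval_append]
        have hplen : (chunkSpec tn (L.drop tn)).1.length = (L.drop tn).length % tn :=
          chunkSpec_pending_len h1 _
        set q := (chunkSpec tn (L.drop tn)).1.length with hq
        have hle : q ≤ (L.drop tn).length := by rw [hplen]; exact Nat.mod_le _ _
        have hdec : (L.drop tn).length = ((L.drop tn).length - q) + q := by omega
        rw [hsplit, show bitval (L.take tn) * 2 ^ (L.drop tn).length + bitval (L.drop tn)
              = bitval (L.drop tn) + 2 ^ q * (bitval (L.take tn) * 2 ^ ((L.drop tn).length - q)) by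
            conv_lhs => rw [hdec]
            rw [pow_add]; ring]
        rw [Int.add_mul_emod_self_left]
  exact main L.length L le_rfl h

lemma chunkSpec_pending_drop {tn : Nat} (h1 : 1 ≤ tn) (L : List Int) :
    (chunkSpec tn L).1 = L.drop (L.length - (chunkSpec tn L).1.length) := by
  have main : ∀ N (L : List Int), L.length ≤ N →
      (chunkSpec tn L).1 = L.drop (L.length - (chunkSpec tn L).1.length) := by
    intro N
    induction N with
    | zero =>
      intro L hL
      rw [chunkSpec_small (by omega)]
      simp
    | succ N ih =>
      intro L hL
      by_cases hlen : L.length < tn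
      · rw [chunkSpec_small hlen]; simp
      · rw [chunkSpec_step h1 (by omega)]
        simp only
        rw [ih (L.drop tn) (by simp; omega)]
        rw [List.drop_drop]
        congr 1
        have hp := chunkSpec_pending_len h1 (L.drop tn)
        have hple : (chunkSpec tn (L.drop tn)).1.length ≤ (L.drop tn).length := by
          rw [hp]; exact Nat.mod_le _ _
        simp only [List.length_drop] at hple ⊢
        omega
  exact main L.length L le_rfl

lemma chunkSpec_append {tn : Nat} (h1 : 1 ≤ tn) (X R : List Int) :
    chunkSpec tn (X ++ R) =
      ((chunkSpec tn ((chunkSpec tn X).1 ++ R)).1,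
        (chunkSpec tn X).2 ++ (chunkSpec tn ((chunkSpec tn X).1 ++ R)).2) := by
  have main : ∀ N (X : List Int), X.length ≤ N →
      chunkSpec tn (X ++ R) =
        ((chunkSpec tn ((chunkSpec tn X).1 ++ R)).1,
          (chunkSpec tn X).2 ++ (chunkSpec tn ((chunkSpec tn X).1 ++ R)).2) := by
    intro N
    induction N with
    | zero =>
      intro X hX
      have : X = [] := by rw [← List.length_eq_zero_iff]; omega
      subst this
      rw [chunkSpec_small (by omega : ([] : List Int).length < tn)]
      simp
    | succ N ih =>
      intro X hX
      by_cases hlen : X.length < tn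
      · rw [chunkSpec_small hlen]; simp
      · have h2 : tn ≤ X.length := by omega
        rw [chunkSpec_step h1 h2]
        have htk : (X ++ R).take tn = X.take tn := List.take_append_of_le_length h2
        have hdr : (X ++ R).drop tn = X.drop tn ++ R := List.drop_append_of_le_length h2
        rw [chunkSpec_step h1 (by simp; omega), htk, hdr]
        rw [ih (X.drop tn) (by simp; omega)]
        simp
  exact main X.length X le_rfl


-- ---- bitsOf ----

lemma length_bitsOf (fn : Nat) (v : Int) : (bitsOf fn v).length = fn := by
  simp [bitsOf]

lemma good_bitsOf (fn : Nat) (v : Int) : GoodL (bitsOf fn v) := by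
  intro b hb
  simp only [bitsOf, List.mem_map] at hb
  obtain ⟨i, _, rfl⟩ := hb
  have h1 := Int.emod_nonneg (v / 2 ^ i) (by norm_num : (2:Int) ≠ 0)
  have h2 := Int.emod_lt_of_pos (v / 2 ^ i) (by norm_num : (0:Int) < 2)
  omega

lemma range_reverse_succ (n : Nat) :
    (List.range (n + 1)).reverse = n :: (List.range n).reverse := by
  rw [List.range_succ, List.reverse_append]
  rfl

lemma bitsOf_succ (fn : Nat) (v : Int) :
    bitsOf (fn + 1) v = (v / 2 ^ fn % 2) :: bitsOf fn v := by
  simp [bitsOf, range_reverse_succ]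

lemma bitval_bitsOf (fn : Nat) (v : Int) : bitval (bitsOf fn v) = v % 2 ^ fn := by
  induction fn with
  | zero => simp [bitsOf, bitval]
  | succ n ih =>
    rw [bitsOf_succ, bitval_cons, length_bitsOf, ih, emod_pow_succ]

-- bitsOf as a forward map over range
lemma bitsOf_eq_range_map (fn : Nat) (v : Int) :
    bitsOf fn v = (List.range fn).map (fun k => v / 2 ^ (fn - 1 - k) % 2) := by
  induction fn with
  | zero => simp [bitsOf]
  | succ n ih =>
    rw [bitsOf_succ, ih, List.range_succ_eq_map, List.map_cons, List.map_map]
    congr 1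
    apply List.map_congr_left
    intro k hk
    simp only [Function.comp_apply, Nat.succ_eq_add_one]
    rw [show n + 1 - 1 - (k + 1) = n - 1 - k from by omega]

lemma pvB_bits_eq (f v : Int) (bl : List Int) (hf : 0 ≤ f) (hv : 0 ≤ v) :
    pvB_bits f v bl = bl ++ bitsOf f.toNat v := by
  unfold pvB_bits
  rw [PySem.List.foldl_append_singleton_eq_map, PySem.List.pyRange_neg_one, List.map_map]
  rw [show (f - 1 - (-1)).toNat = f.toNat by omega]
  rw [bitsOf_eq_range_map]
  congr 1
  apply List.map_congr_left
  intro k hk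
  rw [List.mem_range] at hk
  simp only [Function.comp_apply]
  rw [show (f - 1 - (k : Int)).toNat = f.toNat - 1 - k by omega]
  rw [Int.shiftRight_natCast_right, shr_nonneg v _ hv, show (1:Int) = 2 ^ 1 - 1 by norm_num,
    band_mod _ 1 (Int.ediv_nonneg hv (by positivity)), pow_one]

-- ---- the collecting pass of B ----

lemma guard_bounds {f v : Int} (hf : 0 ≤ f) (h : ¬ (v < 0 ∨ v >>> f.toNat ≠ 0)) :
    0 ≤ v ∧ v < 2 ^ f.toNat := by
  push_neg at h
  obtain ⟨h1, h2⟩ := h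
  have hv : 0 ≤ v := by omega
  refine ⟨hv, ?_⟩
  rw [shr_nonneg v f.toNat hv] at h2
  have h3 := Int.ediv_add_emod v (2 ^ f.toNat)
  have h4 := Int.emod_lt_of_pos v (by positivity : (0:Int) < 2 ^ f.toNat)
  rw [h2] at h3
  omega

lemma collect_eq (f : Int) (hf : 0 ≤ f) :
    ∀ (data : List Int) (bl : List Int),
      pvB_collect f data bl = Option.map (bl ++ ·) (pvB_collect f data []) := by
  intro data
  induction data with
  | nil => intro bl; simp [pvB_collect]
  | cons v rest ih =>
    intro bl
    by_cases hg : v < 0 ∨ v >>> f.toNat ≠ 0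
    · simp [pvB_collect, hg]
    · have hb := guard_bounds hf hg
      simp only [pvB_collect, if_neg hg]
      rw [pvB_bits_eq f v bl hf hb.1, pvB_bits_eq f v [] hf hb.1, List.nil_append,
        ih (bl ++ bitsOf f.toNat v), ih (bitsOf f.toNat v)]
      cases pvB_collect f rest [] <;> simp

lemma collect_good (f : Int) (hf : 0 ≤ f) :
    ∀ (data F : List Int), pvB_collect f data [] = some F → GoodL F := by
  intro data
  induction data with
  | nil =>
    intro F hF
    simp only [pvB_collect, Option.some.injEq] at hF
    subst hF; intro b hb; simp at hb
  | cons v rest ih =>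
    intro F hF
    by_cases hg : v < 0 ∨ v >>> f.toNat ≠ 0
    · simp [pvB_collect, hg] at hF
    · have hb := guard_bounds hf hg
      simp only [pvB_collect, if_neg hg] at hF
      rw [pvB_bits_eq f v [] hf hb.1, List.nil_append, collect_eq f hf rest] at hF
      cases hrest : pvB_collect f rest [] with
      | none => rw [hrest] at hF; simp at hF
      | some F' =>
        rw [hrest] at hF
        simp only [Option.map_some, Option.some.injEq] at hF
        subst hF
        intro b hbmem
        rcases List.mem_append.mp hbmem with h | h
        · exact good_bitsOf f.toNat v b h
        · exact ih F' hrest b h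

-- ---- the chunking pass of B ----

lemma pvB_chunk_eq (t : Int) (ht : 1 ≤ t) (bl : List Int) (hG : GoodL bl) :
    ∀ (fuel : Nat) (pn : Nat) (ret : List Int), pn ≤ bl.length → bl.length - pn ≤ fuel →
      pvB_chunk t fuel ((pn : Nat) : Int) bl ret =
        (((bl.length - (chunkSpec t.toNat (bl.drop pn)).1.length : Nat) : Int),
          ret ++ (chunkSpec t.toNat (bl.drop pn)).2) := by
  have htn : 1 ≤ t.toNat := by omega
  intro fuel
  induction fuel with
  | zero =>
    intro pn ret hpn hfuel
    have hpn' : pn = bl.length := by omega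
    have hd : (bl.drop pn).length = 0 := by simp; omega
    rw [chunkSpec_small (by omega)]
    simp only [pvB_chunk, List.append_nil]
    rw [show bl.length - (bl.drop pn).length = pn from by simp; omega]
  | succ fuel ih =>
    intro pn ret hpn hfuel
    by_cases hc : t ≤ (bl.length : Int) - ((pn : Nat) : Int)
    · have h2 : t.toNat ≤ (bl.drop pn).length := by simp; omega
      rw [pvB_chunk, if_pos hc]
      rw [show ((pn : Nat) : Int) + t = ((pn : Nat) : Int) + ((t.toNat : Nat) : Int) from by omega,
        PySem.List.slice_natCast_add,
        group_eq_bitval (fun x hx => hG x (List.mem_of_mem_drop (List.mem_of_mem_take hx))),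
        show ((pn : Nat) : Int) + ((t.toNat : Nat) : Int) = (((pn + t.toNat : Nat) : Nat) : Int) from by
          push_cast; ring]
      rw [ih (pn + t.toNat) (ret ++ [bitval ((bl.drop pn).take t.toNat)]) (by simp at h2; omega)
            (by omega)]
      rw [show bl.drop (pn + t.toNat) = (bl.drop pn).drop t.toNat from List.drop_drop.symm]
      rw [chunkSpec_step htn h2]
      simp
    · have h2 : (bl.drop pn).length < t.toNat := by simp; omega
      rw [pvB_chunk, if_neg hc, chunkSpec_small h2]
      rw [show bl.length - (bl.drop pn).length = pn from by simp; omega]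
      simp

-- ---- the inner while loop of A ----

lemma pvA_while_eq (t maxv : Int) (ht : 1 ≤ t) (hmv : maxv = ((1:Int) <<< t.toNat) - 1) :
    ∀ (fuel : Nat) (L : List Int) (acc : Int) (ret : List Int), GoodL L → 0 ≤ acc →
      acc % 2 ^ L.length = bitval L → L.length ≤ fuel →
      pvA_while t maxv fuel acc ((L.length : Nat) : Int) ret =
        (((L.length % t.toNat : Nat) : Int), ret ++ (chunkSpec t.toNat L).2) := by
  have htn : 1 ≤ t.toNat := by omega
  intro fuel
  induction fuel with
  | zero =>
    intro L acc ret hG ha hmod hL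
    have : L = [] := by rw [← List.length_eq_zero_iff]; omega
    subst this
    rw [chunkSpec_small (by omega)]
    simp [pvA_while]
  | succ fuel ih =>
    intro L acc ret hG ha hmod hL
    by_cases hc : t ≤ ((L.length : Nat) : Int)
    · have h2 : t.toNat ≤ L.length := by omega
      set k := L.length - t.toNat with hk
      have hcast : ((L.length : Nat) : Int) - t = ((k : Nat) : Int) := by omega
      have hGt : GoodL (L.take t.toNat) := fun x hx => hG x (List.mem_of_mem_take hx)
      have hGd : GoodL (L.drop t.toNat) := fun x hx => hG x (List.mem_of_mem_drop hx)
      have hsplit : bitval L = bitval (L.take t.toNat) * 2 ^ k + bitval (L.drop t.toNat) := by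
        conv_lhs => rw [← List.take_append_drop t.toNat L]
        rw [bitval_append, List.length_drop]
      have hbt := bitval_bounds hGt
      have hbd := bitval_bounds hGd
      rw [List.length_take, Nat.min_eq_left h2] at hbt
      rw [List.length_drop, ← hk] at hbd
      -- the extracted group
      have hval : PySem.Int.band (acc >>> k) maxv = bitval (L.take t.toNat) := by
        rw [shr_nonneg acc k ha, hmv, mask_eq,
          band_mod _ _ (Int.ediv_nonneg ha (by positivity)),
          ediv_emod_pow acc k t.toNat ha,
          show k + t.toNat = L.length by omega, hmod, hsplit]
        rw [show bitval (L.take t.toNat) * 2 ^ k + bitval (L.drop t.toNat)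
              = bitval (L.drop t.toNat) + bitval (L.take t.toNat) * 2 ^ k by ring]
        rw [Int.add_mul_ediv_right _ _ (by positivity : (2:Int) ^ k ≠ 0),
          Int.ediv_eq_zero_of_lt hbd.1 (by omega), zero_add]
      -- the pending invariant for the tail
      have hmod' : acc % 2 ^ (L.drop t.toNat).length = bitval (L.drop t.toNat) := by
        rw [List.length_drop, ← hk]
        have hdvd : (2:Int) ^ k ∣ 2 ^ L.length := pow_dvd_pow 2 (by omega)
        rw [← Int.emod_emod_of_dvd acc hdvd, hmod, hsplit,
          show bitval (L.take t.toNat) * 2 ^ k + bitval (L.drop t.toNat)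
            = bitval (L.drop t.toNat) + 2 ^ k * bitval (L.take t.toNat) by ring,
          Int.add_mul_emod_self_left, Int.emod_eq_of_lt hbd.1 (by omega)]
      rw [pvA_while, if_pos hc, hcast, Int.toNat_natCast, hval]
      have hlen' : (L.drop t.toNat).length = k := by rw [List.length_drop]
      rw [show ((k : Nat) : Int) = (((L.drop t.toNat).length : Nat) : Int) by rw [hlen']]
      rw [ih (L.drop t.toNat) acc (ret ++ [bitval (L.take t.toNat)]) hGd ha hmod'
            (by rw [hlen']; omega)]
      rw [chunkSpec_step htn h2, hlen', ← Nat.mod_eq_sub_mod h2]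
      simp
    · have h2 : L.length < t.toNat := by omega
      rw [pvA_while, if_neg hc, chunkSpec_small h2, Nat.mod_eq_of_lt h2]
      simp


-- ---- the value step of A ----

lemma step_acc (f t acc v : Int) (P : List Int) (hf : 0 ≤ f) (ht : 1 ≤ t)
    (ha : 0 ≤ acc) (hmod : acc % 2 ^ P.length = bitval P) (hP : P.length < t.toNat)
    (hv : 0 ≤ v) (hvlt : v < 2 ^ f.toNat) :
    0 ≤ PySem.Int.band (PySem.Int.bor (acc <<< f.toNat) v) (((1:Int) <<< (f + t - 1).toNat) - 1) ∧
      PySem.Int.band (PySem.Int.bor (acc <<< f.toNat) v) (((1:Int) <<< (f + t - 1).toNat) - 1)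
        % 2 ^ (P.length + f.toNat) = bitval (P ++ bitsOf f.toNat v) := by
  have hmn : (f + t - 1).toNat = f.toNat + t.toNat - 1 := by omega
  have hle : P.length + f.toNat ≤ (f + t - 1).toNat := by omega
  rw [bor_shift acc v f.toNat ha hv hvlt, mask_eq,
    band_mod _ _ (by positivity)]
  constructor
  · exact Int.emod_nonneg _ (by positivity)
  · have hdvd : (2:Int) ^ (P.length + f.toNat) ∣ 2 ^ (f + t - 1).toNat := pow_dvd_pow 2 hle
    rw [Int.emod_emod_of_dvd _ hdvd, emod_pow_add_split acc v P.length f.toNat hv hvlt,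
      hmod, bitval_append, length_bitsOf, bitval_bitsOf, Int.emod_eq_of_lt hv hvlt]

-- ---- main correspondence: A's loop against B's collect-then-chunk ----

lemma loop_eq (f t maxv max_acc : Int) (hf : 0 ≤ f) (ht : 1 ≤ t)
    (hmv : maxv = ((1:Int) <<< t.toNat) - 1) (hma : max_acc = ((1:Int) <<< (f + t - 1).toNat) - 1) :
    ∀ (data : List Int) (acc : Int) (P ret : List Int),
      0 ≤ acc → GoodL P → P.length < t.toNat → acc % 2 ^ P.length = bitval P →
      (pvB_collect f data [] = none →
        pvA_loop f t maxv max_acc data acc ((P.length : Nat) : Int) ret = none) ∧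
      (∀ F, pvB_collect f data [] = some F → GoodL F → ∃ acc',
        pvA_loop f t maxv max_acc data acc ((P.length : Nat) : Int) ret =
          some (acc', ((((P ++ F).length % t.toNat : Nat) : Nat) : Int),
            ret ++ (chunkSpec t.toNat (P ++ F)).2) ∧
        0 ≤ acc' ∧ acc' % 2 ^ ((P ++ F).length % t.toNat) = bitval (chunkSpec t.toNat (P ++ F)).1) := by
  have htn : 1 ≤ t.toNat := by omega
  intro data
  induction data with
  | nil =>
    intro acc P ret ha hG hP hmod
    constructor
    · intro h; simp [pvB_collect] at h
    · intro F hF _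
      simp only [pvB_collect, Option.some.injEq] at hF
      subst hF
      refine ⟨acc, ?_, ha, ?_⟩
      · rw [List.append_nil, chunkSpec_small hP, Nat.mod_eq_of_lt hP]
        simp [pvA_loop]
      · rw [List.append_nil, chunkSpec_small hP, Nat.mod_eq_of_lt hP]
        exact hmod
  | cons v rest ih =>
    intro acc P ret ha hG hP hmod
    by_cases hg : v < 0 ∨ v >>> f.toNat ≠ 0
    · constructor
      · intro _; simp [pvA_loop, hg]
      · intro F hF _; simp [pvB_collect, hg] at hF
    · have hb := guard_bounds hf hg
      -- the new accumulator and the flat bits of v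
      have hstep := step_acc f t acc v P hf ht ha hmod hP hb.1 hb.2
      set acc1 := PySem.Int.band (PySem.Int.bor (acc <<< f.toNat) v)
        (((1:Int) <<< (f + t - 1).toNat) - 1) with hacc1
      set L := P ++ bitsOf f.toNat v with hLdef
      have hLlen : L.length = P.length + f.toNat := by
        rw [hLdef, List.length_append, length_bitsOf]
      have hGL : GoodL L := by
        intro x hx
        rcases List.mem_append.mp hx with h | h
        · exact hG x h
        · exact good_bitsOf f.toNat v x h
      have hmodL : acc1 % 2 ^ L.length = bitval L := by rw [hLlen]; exact hstep.2
      -- unfold one step of A's loop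
      have hbits1 : ((P.length : Nat) : Int) + f = ((L.length : Nat) : Int) := by
        rw [hLlen]; omega
      have hfuel : (((P.length : Nat) : Int) + f).toNat = L.length := by
        rw [hLlen]; omega
      have hwhile := pvA_while_eq t maxv ht hmv L.length L acc1 ret hGL hstep.1 hmodL le_rfl
      have hloopstep :
          pvA_loop f t maxv max_acc (v :: rest) acc ((P.length : Nat) : Int) ret =
            pvA_loop f t maxv max_acc rest acc1
              (((L.length % t.toNat : Nat) : Nat) : Int) (ret ++ (chunkSpec t.toNat L).2) := by
        rw [pvA_loop, if_neg hg, hma]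
        simp only [hbits1, Int.toNat_natCast]
        rw [← hacc1, hwhile]
      -- invariants for the pending remainder
      set P1 := (chunkSpec t.toNat L).1 with hP1
      have hP1len : P1.length = L.length % t.toNat := chunkSpec_pending_len htn L
      have hP1lt : P1.length < t.toNat := by rw [hP1len]; exact Nat.mod_lt _ (by omega)
      have hP1G : GoodL P1 := chunkSpec_pending_good htn hGL
      have hP1mod : acc1 % 2 ^ P1.length = bitval P1 := by
        rw [chunkSpec_pending_mod htn hGL, ← hP1, hP1len,
          ← Int.emod_emod_of_dvd acc1 (pow_dvd_pow 2 (Nat.mod_le L.length t.toNat)), hmodL]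
      have ihres := ih acc1 P1 (ret ++ (chunkSpec t.toNat L).2) hstep.1 hP1G hP1lt hP1mod
      -- how B's collect reads the cons
      have hcollect : pvB_collect f (v :: rest) [] =
          Option.map (bitsOf f.toNat v ++ ·) (pvB_collect f rest []) := by
        simp only [pvB_collect, if_neg hg]
        rw [pvB_bits_eq f v [] hf hb.1, List.nil_append, collect_eq f hf rest]
      constructor
      · intro hnone
        rw [hcollect] at hnone
        cases hrest : pvB_collect f rest [] with
        | none =>
          rw [hloopstep, ← hP1len]
          rw [show ((P1.length : Nat) : Int) = ((P1.length : Nat) : Int) from rfl]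
          exact ihres.1 hrest
        | some F' => rw [hrest] at hnone; simp at hnone
      · intro F hF hGF
        rw [hcollect] at hF
        cases hrest : pvB_collect f rest [] with
        | none => rw [hrest] at hF; simp at hF
        | some F' =>
          rw [hrest] at hF
          simp only [Option.map_some, Option.some.injEq] at hF
          have hGF' : GoodL F' := collect_good f hf rest F' hrest
          obtain ⟨acc', hloop', ha', hmod'⟩ := ihres.2 F' hrest hGF'
          refine ⟨acc', ?_, ha', ?_⟩
          all_goals {
            have happ := chunkSpec_append htn L F'
            rw [← hP1] at happ
            have hassoc : P ++ F = L ++ F' := by rw [← hF, hLdef, List.append_assoc]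
            have e1 : (P1 ++ F').length = P1.length + F'.length := by
              rw [List.length_append]
            have hlen2 : (P ++ F).length % t.toNat = (P1 ++ F').length % t.toNat := by
              rw [e1, hP1len, Nat.mod_add_mod, hassoc, List.length_append]
            first
            | -- the loop-result equality
              (rw [hloopstep, ← hP1len, hloop', hassoc, happ, ← hassoc, hlen2]
               simp [List.append_assoc])
            | -- the accumulator invariant
              (rw [hassoc, happ, ← hassoc, hlen2]
               exact hmod')
          }

-- ===== VERDICT (by name: the statement is the Claim_ definition above) =====
-- value appended in the pad branch / tested in the no-pad branch, on both sides
lemma pad_val_eq (t acc' : Int) (F : List Int) (ht : 1 ≤ t) (hGF : GoodL F) (ha' : 0 ≤ acc')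
    (hmod' : acc' % 2 ^ (F.length % t.toNat) = bitval (chunkSpec t.toNat F).1) :
    PySem.Int.band (acc' <<< (t - ((F.length % t.toNat : Nat) : Int)).toNat) (((1:Int) <<< t.toNat) - 1)
      = bitval (chunkSpec t.toNat F).1 * 2 ^ (t - ((F.length % t.toNat : Nat) : Int)).toNat := by
  have htn : 1 ≤ t.toNat := by omega
  have hpl : F.length % t.toNat < t.toNat := Nat.mod_lt _ (by omega)
  set sh := (t - ((F.length % t.toNat : Nat) : Int)).toNat with hsh
  have hsplit : t.toNat = F.length % t.toNat + sh := by omega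
  have h1 : acc' * 2 ^ sh % 2 ^ t.toNat = acc' % 2 ^ (F.length % t.toNat) * 2 ^ sh := by
    rw [show (2:Int) ^ t.toNat = 2 ^ (F.length % t.toNat + sh) from by rw [← hsplit]]
    exact emod_pow_mul acc' (F.length % t.toNat) sh
  rw [mask_eq, band_mod _ _ (by rw [shl_eq]; positivity), shl_eq, h1, hmod']
theorem convert_bits_spec : Claim_equal_convert_bits := by
  intro data f t pad _ hpre
  obtain ⟨ht, hor⟩ := hpre
  by_cases hf : 0 ≤ f
  case neg =>
    -- from_bits < 0: Pre_ forces data = [], both sides return [] (pad) or None (no pad)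
    obtain ⟨hdata, hft⟩ : data = [] ∧ 0 ≤ f + t - 1 := by
      rcases hor with h | h
      · omega
      · exact h
    subst hdata
    unfold Spec_convert_bits convert_bits convert_bits_alt
    simp only [pvA_loop, pvB_collect, pvB_chunk, List.length_nil]
    by_cases hpad : pad = true
    · rw [if_pos hpad, if_pos hpad, if_neg (by norm_num : ¬ ((0:Int) ≠ 0))]
      simp
    · rw [if_neg hpad, if_neg hpad]
      rw [if_pos (Or.inl (by omega : f ≤ (0:Int))), if_pos]
      exact Or.inl (by simp; omega)
  case pos =>
  have htn : 1 ≤ t.toNat := by omega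
  unfold Spec_convert_bits
  have hinit := loop_eq f t (((1:Int) <<< t.toNat) - 1) (((1:Int) <<< (f + t - 1).toNat) - 1)
    hf ht rfl rfl data 0 [] [] le_rfl (by intro b hb; simp at hb)
    (by simp only [List.length_nil]; omega) (by simp [bitval])
  unfold convert_bits convert_bits_alt
  simp only []
  rw [show ((1 <<< t.toNat : Nat) : Int) - 1 = ((1:Int) <<< t.toNat) - 1 from by
        rw [Int.shiftLeft_eq, one_mul, Nat.one_shiftLeft]; push_cast; ring,
    show ((1 <<< (f + t - 1).toNat : Nat) : Int) - 1 = ((1:Int) <<< (f + t - 1).toNat) - 1 from by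
        rw [Int.shiftLeft_eq, one_mul, Nat.one_shiftLeft]; push_cast; ring]
  cases hc : pvB_collect f data [] with
  | none =>
    have h0 := hinit.1 hc
    rw [show ((([] : List Int).length : Nat) : Int) = 0 from rfl] at h0
    rw [h0]
  | some F =>
    have hGF : GoodL F := collect_good f hf data F hc
    obtain ⟨acc', hloop, ha', hmod'⟩ := hinit.2 F hc hGF
    simp only [List.nil_append] at hloop hmod'
    rw [show ((([] : List Int).length : Nat) : Int) = 0 from rfl] at hloop
    rw [hloop]
    simp only []
    have hch := pvB_chunk_eq t ht F hGF F.length 0 [] (by omega) (by omega)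
    rw [show (((0:Nat)):Int) = (0:Int) from rfl, List.drop_zero] at hch
    simp only [List.nil_append] at hch
    rw [hch]
    simp only []
    rw [show PySem.List.slice F (some ((F.length - (chunkSpec t.toNat F).1.length : Nat) : Int)) none
          = (chunkSpec t.toNat F).1 from by
        rw [PySem.List.slice_from_natCast]
        exact (chunkSpec_pending_drop htn F).symm]
    rw [show (F.length : Int) - ((F.length - (chunkSpec t.toNat F).1.length : Nat) : Int)
          = ((F.length % t.toNat : Nat) : Int) from by
        have hpl := chunkSpec_pending_len htn F
        have hle : (chunkSpec t.toNat F).1.length ≤ F.length := by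
          rw [hpl]; exact Nat.mod_le _ _
        omega]
    have hvalA := pad_val_eq t acc' F ht hGF ha' hmod'
    by_cases hpad : pad = true
    · rw [if_pos hpad, if_pos hpad]
      by_cases hz : ((F.length % t.toNat : Nat) : Int) ≠ 0
      · rw [if_pos hz, if_pos hz, hvalA,
          group_eq_bitval (chunkSpec_pending_good htn hGF), shl_eq]
      · rw [if_neg hz, if_neg hz]
    · rw [if_neg hpad, if_neg hpad]
      have hcond : (f ≤ ((F.length % t.toNat : Nat) : Int) ∨
            PySem.Int.band (acc' <<< (t - ((F.length % t.toNat : Nat) : Int)).toNat)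
              (((1:Int) <<< t.toNat) - 1) ≠ 0) ↔
          (f ≤ ((F.length % t.toNat : Nat) : Int) ∨
            (chunkSpec t.toNat F).1.any (fun b => b ≠ 0) = true) := by
      
        apply or_congr_right
        rw [hvalA]
        have hpb := bitval_eq_zero_iff (chunkSpec_pending_good htn hGF)
        constructor
        · intro h
          have hbv : bitval (chunkSpec t.toNat F).1 ≠ 0 := by
            intro h0; rw [h0, zero_mul] at h; exact h rfl
          have := (not_iff_not.mpr hpb).mp hbv
          push_neg at this
          obtain ⟨b, hbm, hb0⟩ := this
          rw [List.any_eq_true]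
          exact ⟨b, hbm, by simpa using hb0⟩
        · intro h
          rw [List.any_eq_true] at h
          obtain ⟨b, hbm, hb0⟩ := h
          have hbv : bitval (chunkSpec t.toNat F).1 ≠ 0 := by
            rw [Ne, hpb]
            intro hall
            exact (by simpa using hb0 : b ≠ 0) (hall b hbm)
          have hpow : (0:Int) < 2 ^ (t - ((F.length % t.toNat : Nat) : Int)).toNat := by positivity
          intro hmul
          rcases mul_eq_zero.mp hmul with h | h
          · exact hbv h
          · omega
      by_cases hcA : f ≤ ((F.length % t.toNat : Nat) : Int) ∨
          PySem.Int.band (acc' <<< (t - ((F.length % t.toNat : Nat) : Int)).toNat)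
            (((1:Int) <<< t.toNat) - 1) ≠ 0
      · rw [if_pos hcA, if_pos (hcond.mp hcA)]
      · rw [if_neg hcA, if_neg (fun h => hcA (hcond.mpr h))]
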